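-- pv_equiv track=rewrite | github.com/FaramirDev/PythonLabs | 05_TP_Analyseur_Texte/main_analyseur_texte.py | calcul_lettre_espace_off
-- ===== SOURCE A (Python) =====
-- def calcul_lettre_espace_off(user_input):
--     total_lettre= []
--     nb_lettre = 0
--
--     nb_mot = user_input.lower()
--     nb_mot = user_input.split()
--
--     for mot in nb_mot:
--         lettres = list(mot)
--         total_lettre.append(lettres)
--         for let in lettres:
--             nb_lettre += 1
--
--
--     return nb_lettre
-- ===== SOURCE B (Python) =====
-- def calcul_lettre_espace_off(user_input):
--     # Single pass over raw characters: the characters of whitespace-separated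
--     # words are exactly the non-whitespace characters of the input.
--     return sum(1 for ch in user_input if not ch.isspace())
-- ===== Notes on version B (the rewrite author's own statement) =====
-- stated objective: idiomatic
-- what changed: B drops the word-splitting and nested per-word letter loop entirely and counts non-whitespace characters of the whole string in one pass.
import Mathlib
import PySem

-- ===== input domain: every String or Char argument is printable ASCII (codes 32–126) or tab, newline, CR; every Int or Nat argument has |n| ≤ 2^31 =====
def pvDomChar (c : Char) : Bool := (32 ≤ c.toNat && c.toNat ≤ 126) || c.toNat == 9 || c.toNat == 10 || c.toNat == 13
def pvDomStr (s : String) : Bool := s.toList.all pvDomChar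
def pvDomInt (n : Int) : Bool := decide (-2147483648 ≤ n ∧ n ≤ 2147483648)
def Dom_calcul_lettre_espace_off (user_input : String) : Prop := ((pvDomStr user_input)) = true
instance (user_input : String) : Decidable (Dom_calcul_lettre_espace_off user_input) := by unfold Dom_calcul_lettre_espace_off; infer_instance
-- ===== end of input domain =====

-- B counts the non-whitespace characters of the input in a single pass instead of
-- splitting into words and counting each word's letters (idiomatic; same cost).


-- ===== PORT A =====
def calcul_lettre_espace_off (user_input : String) : Int :=
  let total_lettre : List (List Char) := []
  let nb_lettre : Int := 0
  let _nb_mot := PySem.Str.lower user_input        -- overwritten on the next line, as in A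
  let nb_mot := PySem.Str.split₀ user_input
  let st := nb_mot.foldl (fun st mot =>
      let lettres := mot.toList                    -- list(mot)
      let total_lettre := st.1 ++ [lettres]        -- total_lettre.append(lettres)
      let nb_lettre := lettres.foldl (fun n _ => n + 1) st.2   -- for let in lettres: nb_lettre += 1
      (total_lettre, nb_lettre)) (total_lettre, nb_lettre)
  st.2

-- ===== PORT B =====
def calcul_lettre_espace_off_alt (user_input : String) : Int :=
  user_input.toList.foldl (fun n c => if PySem.Chars.isspace c then n else n + 1) 0

-- ===== PRECONDITION & SPEC =====
def Spec_calcul_lettre_espace_off (user_input : String) (out : Int) : Prop := out = calcul_lettre_espace_off_alt user_input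
instance (user_input : String) (out : Int) : Decidable (Spec_calcul_lettre_espace_off user_input out) := by unfold Spec_calcul_lettre_espace_off; infer_instance

-- ===== CLAIM (what is proved, stated in full; the proofs are below) =====
def Claim_equal_calcul_lettre_espace_off : Prop := ∀ (user_input : String), Dom_calcul_lettre_espace_off user_input → Spec_calcul_lettre_espace_off user_input (calcul_lettre_espace_off user_input)

-- ===== LEMMAS AND PROOFS =====

-- the inner letter loop of A adds the word's length
theorem foldl_add_one (cs : List Char) (n : Int) :
    cs.foldl (fun n _ => n + 1) n = n + cs.length := by
  induction cs generalizing n with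
  | nil => simp
  | cons c cs ih => simp [List.foldl, ih]; omega

-- A's outer loop: the counter is the sum of the word lengths
theorem foldl_words (words : List String) (st : List (List Char) × Int) :
    (words.foldl (fun st mot =>
      (st.1 ++ [mot.toList], mot.toList.foldl (fun n _ => n + 1) st.2)) st).2
    = st.2 + ((words.map String.length).sum : Int) := by
  induction words generalizing st with
  | nil => simp
  | cons w ws ih =>
    rw [List.foldl_cons, ih]
    simp [foldl_add_one]
    push_cast; ring

-- split₀.go: total letters produced = non-space chars remaining + current word + accumulator
theorem go_sum (cs cur : List Char) (acc : List (List Char)) :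
    ((PySem.Chars.split₀.go cs cur acc).map List.length).sum
      = (cs.filter (fun c => !PySem.Chars.isspace c)).length + cur.length
        + ((acc.map List.length).sum) := by
  induction cs generalizing cur acc with
  | nil =>
    by_cases h : cur = []
    · simp [PySem.Chars.split₀.go, h]
    · simp [PySem.Chars.split₀.go, List.isEmpty_iff, h]
      omega
  | cons c rest ih =>
    by_cases hs : PySem.Chars.isspace c
    · by_cases h : cur = []
      · simp [PySem.Chars.split₀.go, hs, h, ih]
      · simp [PySem.Chars.split₀.go, hs, List.isEmpty_iff, h, ih]
        omega
    · simp [PySem.Chars.split₀.go, hs, ih]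
      omega

-- B's loop counts the non-space characters
theorem foldl_count (cs : List Char) (n : Int) :
    cs.foldl (fun n c => if PySem.Chars.isspace c then n else n + 1) n
      = n + ((cs.filter (fun c => !PySem.Chars.isspace c)).length : Int) := by
  induction cs generalizing n with
  | nil => simp
  | cons c cs ih =>
    by_cases h : PySem.Chars.isspace c <;> simp [List.foldl, h, ih] <;> push_cast <;> ring

-- ===== VERDICT (by name: the statement is the Claim_ definition above) =====
theorem calcul_lettre_espace_off_spec : Claim_equal_calcul_lettre_espace_off := by
  intro s _
  show calcul_lettre_espace_off s = calcul_lettre_espace_off_alt s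
  unfold calcul_lettre_espace_off calcul_lettre_espace_off_alt
  rw [foldl_words, foldl_count]
  have h : (PySem.Str.split₀ s).map String.length
      = (PySem.Chars.split₀ s.toList).map List.length := by
    rw [← PySem.Str.split₀_map_toList, List.map_map]
    simp [Function.comp]
  rw [h]
  have hg := go_sum s.toList [] []
  simp at hg
  have hg' := congrArg (Nat.cast : Nat → Int) hg
  push_cast at hg'
  simp only [PySem.Chars.split₀]
  push_cast
  omega
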